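-- pv_equiv track=rewrite | github.com/bayazknn/learned | backend/services/scrape.py | _is_pdf_url
-- ===== SOURCE A (Python) =====
-- def _is_pdf_url(url: str) -> bool:
--     """Check if URL points to a PDF file"""
--     if not url:
--         return False
--
--     url_lower = url.lower()
--     # Check file extension
--     if url_lower.endswith('.pdf'):
--         return True
--
--     # Check URL patterns that typically serve PDFs
--     pdf_patterns = [
--         '/pdf/', '/download/', '/paper/', '/document/',
--         'arxiv.org/pdf/', 'papers.nips.cc/paper/',
--         'openreview.net/pdf?', 'proceedings.mlr.press/'
--     ]
--
--     for pattern in pdf_patterns: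
--         if pattern in url_lower:
--             return True
--
--     return False
-- ===== SOURCE B (Python) =====
-- import re
--
-- # One pre-compiled pattern: the '.pdf' extension anchored at the end,
-- # plus each URL pattern that typically serves PDFs as an escaped literal alternative.
-- _PDF_RE = re.compile(
--     r'\.pdf\Z'
--     r'|/pdf/|/download/|/paper/|/document/'
--     r'|arxiv\.org/pdf/|papers\.nips\.cc/paper/'
--     r'|openreview\.net/pdf\?|proceedings\.mlr\.press/'
-- )
--
--
-- def _is_pdf_url(url: str) -> bool:
--     """Check if URL points to a PDF file"""
--     return bool(_PDF_RE.search(url.lower()))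
-- ===== Notes on version B (the rewrite author's own statement) =====
-- stated objective: idiomatic
-- what changed: Replaces the endswith check plus the pattern-by-pattern substring-membership loop with a single pre-compiled regular expression (the end-anchored extension alternative and each pattern as an escaped literal alternative) searched once over the lowercased URL; the empty-url guard disappears since re.search finds nothing in an empty string.
import Mathlib
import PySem

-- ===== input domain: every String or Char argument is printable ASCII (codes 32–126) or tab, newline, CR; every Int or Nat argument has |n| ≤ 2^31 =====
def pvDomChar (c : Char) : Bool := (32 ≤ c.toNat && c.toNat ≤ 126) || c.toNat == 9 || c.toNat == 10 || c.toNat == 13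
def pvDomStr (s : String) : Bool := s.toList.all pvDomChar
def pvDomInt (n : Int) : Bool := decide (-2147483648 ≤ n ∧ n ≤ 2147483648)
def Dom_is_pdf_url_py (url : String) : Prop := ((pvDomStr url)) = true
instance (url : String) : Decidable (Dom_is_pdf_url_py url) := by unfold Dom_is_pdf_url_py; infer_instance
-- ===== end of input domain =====

-- B replaces A's endswith check plus pattern-by-pattern membership loop with one pre-compiled
-- regular expression of literal alternatives searched once over the lowercased URL (idiomatic; same cost).

-- shared constant: the pattern list from the Python source
def pdfPatterns : List String :=
  ["/pdf/", "/download/", "/paper/", "/document/",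
   "arxiv.org/pdf/", "papers.nips.cc/paper/",
   "openreview.net/pdf?", "proceedings.mlr.press/"]

-- ===== PORT A =====
def is_pdf_url_py (url : String) : Bool :=
  if url.toList = [] then false
  else
    let url_lower := PySem.Str.lower url
    if PySem.Str.endswith url_lower ".pdf" then true
    else pdfPatterns.any (fun pattern => PySem.Str.isIn pattern url_lower)

-- ===== PORT B =====
-- hand-port of re.search on Source B's literal-alternation pattern (exact for this regex):
-- try each start position left to right; at each, try the alternatives in the pattern's
-- order — '\.pdf\Z' (the literal '.pdf' that must reach the end) first, then each escaped
-- literal pattern as a prefix of the remaining suffix.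
def pvAltScan (cs : List Char) : Bool :=
  match cs with
  | [] => false
  | c :: rest =>
    if (c :: rest).length == 4 && ".pdf".toList.isPrefixOf (c :: rest) then true
    else if pdfPatterns.any (fun p => p.toList.isPrefixOf (c :: rest)) then true
    else pvAltScan rest

def is_pdf_url_py_alt (url : String) : Bool :=
  pvAltScan (PySem.Chars.lower url.toList)

-- ===== PRECONDITION & SPEC =====
def Spec_is_pdf_url_py (url : String) (out : Bool) : Prop := out = is_pdf_url_py_alt url
instance (url : String) (out : Bool) : Decidable (Spec_is_pdf_url_py url out) := by unfold Spec_is_pdf_url_py; infer_instance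

-- ===== CLAIM (what is proved, stated in full; the proofs are below) =====
def Claim_equal_is_pdf_url_py : Prop := ∀ (url : String), Dom_is_pdf_url_py url → Spec_is_pdf_url_py url (is_pdf_url_py url)

-- ===== LEMMAS AND PROOFS =====

-- the end-anchored alternative at one position fires iff the whole remaining suffix IS '.pdf'
lemma pvAnchor_iff (cs : List Char) :
    ((cs.length == 4 && ".pdf".toList.isPrefixOf cs) = true) ↔ ".pdf".toList = cs := by
  simp only [Bool.and_eq_true, beq_iff_eq, List.isPrefixOf_iff_prefix]
  constructor
  · rintro ⟨h4, hp⟩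
    exact hp.eq_of_length (by simpa using h4.symm)
  · rintro rfl
    exact ⟨rfl, List.prefix_refl _⟩

-- characterisation of the search: it matches iff '.pdf' is a suffix or some pattern is an infix
lemma pvAltScan_iff (cs : List Char) :
    pvAltScan cs = true ↔
      (".pdf".toList <:+ cs ∨ ∃ p ∈ pdfPatterns, p.toList <:+: cs) := by
  induction cs with
  | nil =>
    simp [pvAltScan, pdfPatterns, List.suffix_nil]
  | cons c rest ih =>
    simp only [pvAltScan]
    rw [show (if ((c :: rest).length == 4 && ".pdf".toList.isPrefixOf (c :: rest)) then true
          else if pdfPatterns.any (fun p => p.toList.isPrefixOf (c :: rest)) then true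
          else pvAltScan rest)
        = (((c :: rest).length == 4 && ".pdf".toList.isPrefixOf (c :: rest))
            || pdfPatterns.any (fun p => p.toList.isPrefixOf (c :: rest))
            || pvAltScan rest) by
      cases h1 : ((c :: rest).length == 4 && ".pdf".toList.isPrefixOf (c :: rest)) <;>
      cases h2 : pdfPatterns.any (fun p => p.toList.isPrefixOf (c :: rest)) <;> simp]
    simp only [Bool.or_eq_true, pvAnchor_iff, List.any_eq_true,
      List.isPrefixOf_iff_prefix, ih, List.suffix_cons_iff, List.infix_cons_iff]
    constructor
    · rintro ((h | ⟨p, hp, hpre⟩) | (h | ⟨p, hp, hinf⟩))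
      · exact Or.inl (Or.inl h)
      · exact Or.inr ⟨p, hp, Or.inl hpre⟩
      · exact Or.inl (Or.inr h)
      · exact Or.inr ⟨p, hp, Or.inr hinf⟩
    · rintro ((h | h) | ⟨p, hp, (hpre | hinf)⟩)
      · exact Or.inl (Or.inl h)
      · exact Or.inr (Or.inl h)
      · exact Or.inl (Or.inr ⟨p, hp, hpre⟩)
      · exact Or.inr (Or.inr ⟨p, hp, hinf⟩)

-- ===== VERDICT (by name: the statement is the Claim_ definition above) =====
theorem is_pdf_url_py_spec : Claim_equal_is_pdf_url_py := by
  intro url _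
  unfold Spec_is_pdf_url_py is_pdf_url_py is_pdf_url_py_alt
  by_cases hnil : url.toList = []
  · simp [hnil, PySem.Chars.lower, pvAltScan]
  · simp only [if_neg hnil]
    have hlow : (PySem.Str.lower url).toList = PySem.Chars.lower url.toList := by
      simp [PySem.Str.toList_lower]
    have he : (PySem.Str.endswith (PySem.Str.lower url) ".pdf" = true) ↔
        ".pdf".toList <:+ PySem.Chars.lower url.toList := by
      rw [PySem.Str.endswith_eq, hlow, PySem.Chars.endswith_iff]
    have hany : (pdfPatterns.any (fun pattern => PySem.Str.isIn pattern (PySem.Str.lower url)) = true) ↔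
        ∃ p ∈ pdfPatterns, p.toList <:+: PySem.Chars.lower url.toList := by
      simp only [List.any_eq_true, PySem.Str.isIn_iff_infix, hlow]
    rw [show (if PySem.Str.endswith (PySem.Str.lower url) ".pdf" then true
          else pdfPatterns.any (fun pattern => PySem.Str.isIn pattern (PySem.Str.lower url)))
        = (PySem.Str.endswith (PySem.Str.lower url) ".pdf"
            || pdfPatterns.any (fun pattern => PySem.Str.isIn pattern (PySem.Str.lower url))) by
      cases PySem.Str.endswith (PySem.Str.lower url) ".pdf" <;> simp]
    rw [Bool.eq_iff_iff, pvAltScan_iff]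
    simp only [Bool.or_eq_true, he, hany]
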